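-- pv_equiv track=rewrite | github.com/Jazafras/WAH-Compression | bitmap.py | literal_count
-- ===== SOURCE A (Python) =====
-- from itertools import groupby
--
-- def literal_count(lines, column, bit):
--     literalCount = 0
--     bit_count = 0
--     bit_strings = ""
--     # split column into rows of given bits
--     for x in lines:
--         bits = list(x[column])
--         for y in bits:
--             bit_strings += y
--             bit_count += 1
--             if bit_count == (bit - 1):
--                 bit_strings += ","
--                 bit_count = 0
--     bit_list = [x.strip() for x in bit_strings.split(',')]
--
--     # group bits by (segment, # of consecutive repetitions)
--     grouped_bit_list = [(k, sum(1 for i in g)) for k, g in groupby(bit_list)]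
--
--     for x in grouped_bit_list:
--         segment = x[0]
--         if segment.count(segment[0]) != len(segment): #segment is a literal
--             literalCount += x[1]
--     return literalCount
-- ===== SOURCE B (Python) =====
-- def literal_count(lines, column, bit):
--     # single streaming pass: no global comma-string, no split list, no groupby
--     count = 0
--     n = 0
--     buf = []
--
--     def finalize(buf):
--         nonlocal count
--         for piece in "".join(buf).split(','):
--             s = piece.strip()
--             if s.count(s[0]) != len(s):  # segment is a literal
--                 count += 1
--
--     for x in lines:
--         for c in x[column]:
--             buf.append(c)
--             n += 1
--             if n == bit - 1:
--                 finalize(buf)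
--                 buf = []
--                 n = 0
--     finalize(buf)
--     return count
-- ===== Notes on version B (the rewrite author's own statement) =====
-- stated objective: alternative
-- what changed: B replaces A's pipeline (build one big comma-separated string, split it, strip a list, run-length-group with groupby, then scan the groups) by a single streaming pass that keeps only a running counter and the current segment buffer and counts each segment's literal pieces the moment the segment completes.
import Mathlib
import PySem

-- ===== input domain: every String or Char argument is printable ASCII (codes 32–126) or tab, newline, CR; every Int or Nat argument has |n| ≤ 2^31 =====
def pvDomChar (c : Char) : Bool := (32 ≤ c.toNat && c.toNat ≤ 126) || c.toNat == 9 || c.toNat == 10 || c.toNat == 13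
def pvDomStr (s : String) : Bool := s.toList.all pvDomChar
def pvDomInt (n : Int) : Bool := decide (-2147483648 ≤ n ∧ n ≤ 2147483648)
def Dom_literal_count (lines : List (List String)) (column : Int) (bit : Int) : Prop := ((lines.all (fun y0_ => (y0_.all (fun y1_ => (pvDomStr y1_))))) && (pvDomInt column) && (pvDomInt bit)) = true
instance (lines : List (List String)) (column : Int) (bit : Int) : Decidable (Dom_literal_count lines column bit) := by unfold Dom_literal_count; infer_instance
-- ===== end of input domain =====

-- B is a single streaming pass (counter + current-segment buffer, finalized as it fills) instead of
-- A's materialized comma-string, split list and groupby; equivalence is about the return value.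

-- ===== PORT A =====
-- the Python test `segment.count(segment[0]) != len(segment)`; the 'a' default is never used
-- under Pre_ (Python raises IndexError on an empty segment, and such inputs are outside Pre_)
def pvIsLiteral (s : List Char) : Bool := s.count ((PySem.List.pyGet? s 0).getD 'a') != s.length

-- body of A's inner `for y in bits` loop
def pvStepA (bit : Int) (st : List Char × Int) (y : Char) : List Char × Int :=
  let bit_strings := st.1 ++ [y]
  let bit_count := st.2 + 1
  if bit_count = bit - 1 then (bit_strings ++ [','], 0) else (bit_strings, bit_count)

-- itertools.groupby fused with `sum(1 for i in g)`: run-length encoding of consecutive equal elements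
def pvGroupbyGo (a : List Char) (n : Int) : List (List Char) → List (List Char × Int)
  | [] => [(a, n)]
  | b :: rest => if b = a then pvGroupbyGo a (n + 1) rest else (a, n) :: pvGroupbyGo b 1 rest

def pvGroupby : List (List Char) → List (List Char × Int)
  | [] => []
  | a :: rest => pvGroupbyGo a 1 rest

def literal_count (lines : List (List String)) (column : Int) (bit : Int) : Int :=
  let st := lines.foldl
    (fun st x => ((PySem.List.pyGetD x column "").toList).foldl (pvStepA bit) st)
    (([] : List Char), (0 : Int))
  let bit_list := (PySem.Chars.splitOn st.1 [',']).map PySem.Chars.strip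
  let grouped_bit_list := pvGroupby bit_list
  grouped_bit_list.foldl (fun acc x => if pvIsLiteral x.1 then acc + x.2 else acc) 0

-- ===== PORT B =====
-- B's `finalize`: count the literal comma-separated pieces of the finished segment buffer
def pvFinalize (acc : Int) (buf : List Char) : Int :=
  (PySem.Chars.splitOn buf [',']).foldl
    (fun acc piece => if pvIsLiteral (PySem.Chars.strip piece) then acc + 1 else acc) acc

-- body of B's inner `for c in x[column]` loop; state = (count, n, buf)
def pvStepB (bit : Int) (st : Int × Int × List Char) (c : Char) : Int × Int × List Char :=
  let buf := st.2.2 ++ [c]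
  let n := st.2.1 + 1
  if n = bit - 1 then (pvFinalize st.1 buf, 0, ([] : List Char)) else (st.1, n, buf)

def literal_count_alt (lines : List (List String)) (column : Int) (bit : Int) : Int :=
  let st := lines.foldl
    (fun st x => ((PySem.List.pyGetD x column "").toList).foldl (pvStepB bit) st)
    ((0 : Int), (0 : Int), ([] : List Char))
  pvFinalize st.1 st.2.2

-- ===== PRECONDITION & SPEC =====
-- the characters of the selected column, concatenated across lines
def pvColStream (lines : List (List String)) (column : Int) : List Char :=
  lines.flatMap (fun x => (PySem.List.pyGetD x column "").toList)

-- the segments A strips: the stream chunked into pieces of bit-1 characters plus the (possibly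
-- empty) trailing remainder, each chunk further divided at its ',' characters
def pvPieces (S : List Char) (bit : Int) : List (List Char) :=
  let k := (bit - 1).toNat
  let chunks := if 1 ≤ bit - 1 then
      (List.range (S.length / k + 1)).map (fun i => (S.drop (i * k)).take k)
    else [S]
  chunks.flatMap (fun c => PySem.Chars.splitOn c [','])

-- exactly the inputs where the Python returns: every line's column index in range (else IndexError)
-- and no segment stripping to the empty string (else `segment[0]` raises IndexError)
def Pre_literal_count (lines : List (List String)) (column : Int) (bit : Int) : Prop :=
  (∀ x ∈ lines, PySem.Raise.InRange x.length column) ∧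
  (∀ p ∈ pvPieces (pvColStream lines column) bit, PySem.Chars.strip p ≠ [])
instance (lines : List (List String)) (column : Int) (bit : Int) : Decidable (Pre_literal_count lines column bit) := by unfold Pre_literal_count; infer_instance

def pvWitness_literal_count : List (List String) × Int × Int := ([["011"], ["10"]], 0, 3)

def Spec_literal_count (lines : List (List String)) (column : Int) (bit : Int) (out : Int) : Prop := out = literal_count_alt lines column bit
instance (lines : List (List String)) (column : Int) (bit : Int) (out : Int) : Decidable (Spec_literal_count lines column bit out) := by unfold Spec_literal_count; infer_instance

-- ===== CLAIM (what is proved, stated in full; the proofs are below) =====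
def Claim_equal_literal_count : Prop := ∀ (lines : List (List String)) (column : Int) (bit : Int), Dom_literal_count lines column bit → Pre_literal_count lines column bit → Spec_literal_count lines column bit (literal_count lines column bit)

-- ===== LEMMAS AND PROOFS =====

-- specification version of Python's `split(',')`
def pvSpl : List Char → List (List Char)
  | [] => [[]]
  | c :: rest =>
    if c = ',' then [] :: pvSpl rest
    else match pvSpl rest with
      | [] => [[c]]
      | h :: t => (c :: h) :: t

theorem pvSpl_ne_nil (l : List Char) : pvSpl l ≠ [] := by
  cases l with
  | nil => simp [pvSpl]
  | cons c rest =>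
    simp only [pvSpl]
    split
    · simp
    · split <;> simp

theorem pvSplitOn_go_eq (fuel : Nat) : ∀ (l cur : List Char) (accs : List (List Char)),
    l.length < fuel →
    PySem.Chars.splitOn.go [','] fuel l cur accs =
      accs.reverse ++ (cur.reverse ++ (pvSpl l).headI) :: (pvSpl l).tail := by
  induction fuel with
  | zero => intro l cur accs h; omega
  | succ fuel ih =>
    intro l cur accs h
    cases l with
    | nil => simp [PySem.Chars.splitOn.go, pvSpl]
    | cons c rest =>
      simp only [PySem.Chars.splitOn.go, List.isPrefixOf, List.length_cons] at *
      by_cases hc : c = ','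
      · subst hc
        simp only [beq_self_eq_true, Bool.true_and, if_true, List.length_nil,
          Nat.zero_add, List.drop_succ_cons, List.drop_zero]
        rw [ih rest [] _ (by omega)]
        simp only [pvSpl, if_true, List.reverse_cons, List.append_assoc, List.reverse_nil,
          List.nil_append, List.headI, List.tail, List.singleton_append]
        cases h2 : pvSpl rest with
        | nil => exact absurd h2 (pvSpl_ne_nil rest)
        | cons a t => simp
      · rw [if_neg (by simp [Ne.symm hc])]
        rw [ih rest (c :: cur) accs (by omega)]
        simp only [pvSpl, if_neg hc]
        cases h2 : pvSpl rest with
        | nil => exact absurd h2 (pvSpl_ne_nil rest)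
        | cons a t => simp

theorem pvSplitOn_eq (l : List Char) : PySem.Chars.splitOn l [','] = pvSpl l := by
  unfold PySem.Chars.splitOn
  rw [pvSplitOn_go_eq (l.length + 1) l [] [] (by omega)]
  cases h : pvSpl l with
  | nil => exact absurd h (pvSpl_ne_nil l)
  | cons a t => simp

theorem pvSpl_append_comma (xs ys : List Char) :
    pvSpl (xs ++ ',' :: ys) = pvSpl xs ++ pvSpl ys := by
  induction xs with
  | nil => simp [pvSpl]
  | cons c rest ih =>
    simp only [List.cons_append, pvSpl, ih]
    split
    · rfl
    · cases h : pvSpl rest with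
      | nil => exact absurd h (pvSpl_ne_nil rest)
      | cons a t => simp

-- the literal pieces of a finished-segment buffer
def pvQ (p : List Char) : Bool := pvIsLiteral (PySem.Chars.strip p)

theorem pvFoldlCount : ∀ (l : List (List Char)) (acc : Int),
    l.foldl (fun acc piece => if pvIsLiteral (PySem.Chars.strip piece) then acc + 1 else acc) acc =
      acc + (l.countP pvQ : Int) := by
  intro l
  induction l with
  | nil => simp
  | cons p rest ih =>
    intro acc
    simp only [List.foldl_cons, List.countP_cons, ih, pvQ]
    split <;> rename_i hp <;> simp_all <;> push_cast <;> ring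

theorem pvFinalize_eq (acc : Int) (buf : List Char) :
    pvFinalize acc buf = acc + ((pvSpl buf).countP pvQ : Int) := by
  unfold pvFinalize
  rw [pvSplitOn_eq, pvFoldlCount]

theorem pvGroupbyGo_count : ∀ (rest : List (List Char)) (a : List Char) (n acc : Int),
    (pvGroupbyGo a n rest).foldl (fun acc x => if pvIsLiteral x.1 then acc + x.2 else acc) acc =
      acc + (if pvIsLiteral a then n else 0) + (rest.countP pvIsLiteral : Int) := by
  intro rest
  induction rest with
  | nil => intro a n acc; simp [pvGroupbyGo]; split <;> simp
  | cons b r ih =>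
    intro a n acc
    simp only [pvGroupbyGo]
    by_cases hb : b = a
    · subst hb
      rw [if_pos rfl, ih]
      simp only [List.countP_cons]
      split <;> rename_i hp <;> simp [hp] <;> push_cast <;> ring
    · rw [if_neg hb]
      simp only [List.foldl_cons, ih, List.countP_cons]
      by_cases hp : pvIsLiteral a <;> by_cases hq : pvIsLiteral b <;>
        simp [hp, hq] <;> push_cast <;> ring

theorem pvGroupby_count (l : List (List Char)) :
    (pvGroupby l).foldl (fun acc x => if pvIsLiteral x.1 then acc + x.2 else acc) 0 =
      (l.countP pvIsLiteral : Int) := by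
  cases l with
  | nil => simp [pvGroupby]
  | cons a rest =>
    simp only [pvGroupby, pvGroupbyGo_count, List.countP_cons]
    split <;> rename_i hp <;> simp [hp] <;> push_cast <;> ring

-- relational invariant between A's (bit_strings, bit_count) and B's (count, n, buf)
def pvInv (c : Int) (bs buf : List Char) : Prop :=
  (bs = buf ∧ c = 0) ∨
  ∃ pre, bs = pre ++ ',' :: buf ∧ c = ((pvSpl pre).countP pvQ : Int)

theorem pvCore (bit : Int) : ∀ (S : List Char) (bs buf : List Char) (bc c : Int),
    pvInv c bs buf →
    (S.foldl (pvStepA bit) (bs, bc)).2 = (S.foldl (pvStepB bit) (c, bc, buf)).2.1 ∧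
    pvInv (S.foldl (pvStepB bit) (c, bc, buf)).1
          (S.foldl (pvStepA bit) (bs, bc)).1
          (S.foldl (pvStepB bit) (c, bc, buf)).2.2 := by
  intro S
  induction S with
  | nil => intro bs buf bc c h; exact ⟨rfl, h⟩
  | cons y S ih =>
    intro bs buf bc c h
    simp only [List.foldl_cons, pvStepA, pvStepB]
    by_cases ht : bc + 1 = bit - 1
    · rw [if_pos ht, if_pos ht]
      apply ih
      refine Or.inr ⟨bs ++ [y], by simp, ?_⟩
      rcases h with ⟨rfl, rfl⟩ | ⟨pre, rfl, rfl⟩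
      · rw [pvFinalize_eq]; ring
      · rw [pvFinalize_eq, List.append_assoc, List.cons_append,
          pvSpl_append_comma, List.countP_append]
        push_cast; ring
    · rw [if_neg ht, if_neg ht]
      apply ih
      rcases h with ⟨rfl, rfl⟩ | ⟨pre, rfl, rfl⟩
      · exact Or.inl ⟨rfl, rfl⟩
      · exact Or.inr ⟨pre, by simp, rfl⟩

theorem pvFinish (c : Int) (bs buf : List Char) (h : pvInv c bs buf) :
    (((pvSpl bs).map PySem.Chars.strip).countP pvIsLiteral : Int) = pvFinalize c buf := by
  rw [List.countP_map, pvFinalize_eq]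
  rcases h with ⟨rfl, rfl⟩ | ⟨pre, rfl, rfl⟩
  · simp [Function.comp_def]; rfl
  · rw [pvSpl_append_comma, List.countP_append]
    simp only [Function.comp_def]
    push_cast
    rfl

-- ===== VERDICT (by name: the statement is the Claim_ definition above) =====
theorem literal_count_spec : Claim_equal_literal_count := by
  intro lines column bit _ _
  unfold Spec_literal_count literal_count literal_count_alt
  rw [show (fun (st : List Char × Int) x =>
        ((PySem.List.pyGetD x column "").toList).foldl (pvStepA bit) st) =
      (fun st x => List.foldl (pvStepA bit) st ((fun x => (PySem.List.pyGetD x column "").toList) x)) from rfl,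
    ← List.foldl_flatMap]
  rw [show (fun (st : Int × Int × List Char) x =>
        ((PySem.List.pyGetD x column "").toList).foldl (pvStepB bit) st) =
      (fun st x => List.foldl (pvStepB bit) st ((fun x => (PySem.List.pyGetD x column "").toList) x)) from rfl,
    ← List.foldl_flatMap]
  have h := pvCore bit (lines.flatMap (fun x => (PySem.List.pyGetD x column "").toList))
      [] [] 0 0 (Or.inl ⟨rfl, rfl⟩)
  simp only [pvSplitOn_eq, pvGroupby_count]
  exact pvFinish _ _ _ h.2
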